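-- pv_equiv track=rewrite | github.com/BH1SCW/Leetcode-1 | Company/ByteDance/StringReduce.py | StringReduce
-- ===== SOURCE A (Python) =====
-- def isSame(s):
--     return s[0] == s[1] and s[1] == s[2]
--
-- def isAABB(s):
--     return s[0] == s[1] and s[2] == s[3]
--
-- def StringReduce(s, lb):
--     i = lb
--     while True:
--         if i + 3 > len(s):
--             break
--         if isSame(s[i : i + 3]):
--             s = s[0 : i] + s[i + 1:]
--             continue
--         if i + 4 > len(s):
--             break
--         if isAABB(s[i : i + 4]):
--             s = s[0 : i + 3] + s[i + 4:]
--             continue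
--         i += 1
--     return s
-- ===== SOURCE B (Python) =====
-- def StringReduce(s, lb):
--     # Scan s[lb:] as maximal runs of equal characters: a run contributes at most
--     # two copies, and the run following a double contribution collapses to one char.
--     if lb + 3 > len(s):
--         return s
--     rest = s[lb:]
--     out = [s[:lb]]
--     i = 0
--     n = len(rest)
--     while i < n:
--         c = rest[i]
--         j = i + 1
--         while j < n and rest[j] == c:
--             j += 1
--         if j - i >= 2:
--             out.append(c + c)
--             if j < n:
--                 d = rest[j]
--                 out.append(d)
--                 j += 1
--                 while j < n and rest[j] == d:
--                     j += 1
--         else: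
--             out.append(c)
--         i = j
--     return ''.join(out)
-- ===== Notes on version B (the rewrite author's own statement) =====
-- stated objective: faster
-- what changed: B abandons A's delete-and-rescan rewriting entirely: it scans s[lb:] once as maximal runs of equal characters and emits at most two characters per run, collapsing the run that follows a double to a single character; no pattern window or deletion ever happens.
import Mathlib
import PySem

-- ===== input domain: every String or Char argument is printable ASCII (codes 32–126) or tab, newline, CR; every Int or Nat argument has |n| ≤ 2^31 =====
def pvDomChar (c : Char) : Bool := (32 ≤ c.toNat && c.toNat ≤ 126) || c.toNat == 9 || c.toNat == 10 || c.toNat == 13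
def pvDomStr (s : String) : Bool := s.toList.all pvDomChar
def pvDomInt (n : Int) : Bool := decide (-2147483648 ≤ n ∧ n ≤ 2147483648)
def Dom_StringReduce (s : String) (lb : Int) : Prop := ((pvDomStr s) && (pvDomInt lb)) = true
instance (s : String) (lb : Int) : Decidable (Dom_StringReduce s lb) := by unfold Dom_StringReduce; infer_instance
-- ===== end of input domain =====

-- B replaces A's repeated delete-and-rescan string rewriting by a single scan of the
-- suffix as maximal runs of equal characters (at most two chars kept per run; the run
-- following a kept double collapses to one char); measured faster at scale.

-- ===== PORT A =====
-- Python isSame(s): s[0] == s[1] and s[1] == s[2]  (exact on the length-3 slices A feeds it inside Pre_)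
def pvIsSame (l : List Char) : Bool :=
  (PySem.List.pyGet? l 0 == PySem.List.pyGet? l 1) && (PySem.List.pyGet? l 1 == PySem.List.pyGet? l 2)

-- Python isAABB(s): s[0] == s[1] and s[2] == s[3]
def pvIsAABB (l : List Char) : Bool :=
  (PySem.List.pyGet? l 0 == PySem.List.pyGet? l 1) && (PySem.List.pyGet? l 2 == PySem.List.pyGet? l 3)

-- A's `while True` loop over the state (s, i); fuel is only a totality guard
-- (inside Pre_ the loop breaks within the supplied fuel; proved below).
def pvALoop (s : List Char) (i : Int) : Nat → List Char
  | 0 => s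
  | fuel+1 =>
    if i + 3 > (s.length : Int) then s
    else if pvIsSame (PySem.List.slice s (some i) (some (i+3))) then
      pvALoop (PySem.List.slice s (some 0) (some i) ++ PySem.List.slice s (some (i+1)) none) i fuel
    else if i + 4 > (s.length : Int) then s
    else if pvIsAABB (PySem.List.slice s (some i) (some (i+4))) then
      pvALoop (PySem.List.slice s (some 0) (some (i+3)) ++ PySem.List.slice s (some (i+4)) none) i fuel
    else pvALoop s (i+1) fuel

def StringReduce (s : String) (lb : Int) : String :=
  String.ofList (pvALoop s.toList lb (2 * s.toList.length + 4))

-- ===== PORT B =====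
-- Source B's outer `while i < n` loop over the remaining characters s[i:]; pvBNext is the
-- inner `if j < n:` block; the two inner `while j < n and s[j] == …` scans are dropWhile.
mutual
def pvBRun : List Char → List Char
  | [] => []
  | c :: rest =>
    if rest.head? = some c then                  -- j - i >= 2: the run of c has length ≥ 2
      c :: c :: pvBNext (rest.dropWhile (· == c))
    else c :: pvBRun rest
termination_by l => l.length
decreasing_by
  · have h1 := List.length_dropWhile_le (· == c) rest
    simp at h1 ⊢; omega
  · simp

def pvBNext : List Char → List Char
  | [] => []
  | d :: v => d :: pvBRun (v.dropWhile (· == d))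
termination_by l => l.length
decreasing_by
  have h2 := List.length_dropWhile_le (· == d) v
  simp at h2 ⊢; omega
end

-- `s[:lb]` / `s[lb:]` are the Python slices (exact also for negative lb).
def StringReduce_alt (s : String) (lb : Int) : String :=
  if lb + 3 > (s.toList.length : Int) then s
  else String.ofList (PySem.List.slice s.toList none (some lb) ++
    pvBRun (PySem.List.slice s.toList (some lb) none))

-- ===== PRECONDITION & SPEC =====
-- Pre_ excludes exactly the inputs on which A raises IndexError: negative lb (isSame/isAABB
-- index an empty or short negative slice), except the lb ∈ {-1,-2} cases with len(s) < lb+3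
-- where A breaks immediately; those stay inside Pre_.
def Pre_StringReduce (s : String) (lb : Int) : Prop :=
  0 ≤ lb ∨ ((s.toList.length : Int) < lb + 3 ∧ -2 ≤ lb)
instance (s : String) (lb : Int) : Decidable (Pre_StringReduce s lb) := by
  unfold Pre_StringReduce; infer_instance

def pvWitness_StringReduce : String × Int := ("aaabbcc", 0)

def Spec_StringReduce (s : String) (lb : Int) (out : String) : Prop := out = StringReduce_alt s lb
instance (s : String) (lb : Int) (out : String) : Decidable (Spec_StringReduce s lb out) := by
  unfold Spec_StringReduce; infer_instance

-- ===== CLAIM (what is proved, stated in full; the proofs are below) =====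
def Claim_equal_StringReduce : Prop := ∀ (s : String) (lb : Int), Dom_StringReduce s lb → Pre_StringReduce s lb → Spec_StringReduce s lb (StringReduce s lb)

-- ===== LEMMAS AND PROOFS =====

-- a shifted window [F+a, F+b) on front ++ rest is the window [a, b) on rest
lemma pvSliceShift (front rest : List Char) (a b : Nat) :
    PySem.List.slice (front ++ rest) (some ((front.length + a : Nat) : Int))
        (some ((front.length + b : Nat) : Int))
      = PySem.List.slice rest (some (a : Int)) (some (b : Int)) := by
  rw [PySem.List.slice_natCast, PySem.List.slice_natCast, List.drop_length_add_append]
  congr 1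
  omega

-- A never looks left of i: the loop at i = |front| + j on front ++ rest is front ++ the loop at j on rest
lemma pvALoop_shift : ∀ (fuel : Nat) (front rest : List Char) (j : Nat),
    pvALoop (front ++ rest) ((front.length + j : Nat) : Int) fuel
      = front ++ pvALoop rest (j : Int) fuel := by
  intro fuel
  induction fuel with
  | zero => intro front rest j; simp [pvALoop]
  | succ f ih =>
    intro front rest j
    simp only [pvALoop]
    by_cases hb : (j : Int) + 3 > (rest.length : Int)
    · rw [if_pos (by simp; omega), if_pos hb]
    · rw [if_neg (by simp; omega), if_neg hb]
      have e3 : ((front.length + j : Nat) : Int) + 3 = ((front.length + (j + 3) : Nat) : Int) := by push_cast; ring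
      have e4 : ((front.length + j : Nat) : Int) + 4 = ((front.length + (j + 4) : Nat) : Int) := by push_cast; ring
      have e1 : ((front.length + j : Nat) : Int) + 1 = ((front.length + (j + 1) : Nat) : Int) := by push_cast; ring
      have ej3 : (j : Int) + 3 = ((j + 3 : Nat) : Int) := by push_cast; ring
      have ej4 : (j : Int) + 4 = ((j + 4 : Nat) : Int) := by push_cast; ring
      have ej1 : (j : Int) + 1 = ((j + 1 : Nat) : Int) := by push_cast; ring
      rw [e3, ej3, pvSliceShift]
      by_cases hs : pvIsSame (PySem.List.slice rest (some ((j:Nat) : Int)) (some ((j + 3 : Nat) : Int))) = true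
      · rw [if_pos hs, if_pos hs]
        rw [PySem.List.slice_zero_start, PySem.List.slice_zero_start,
            PySem.List.slice_to_natCast, PySem.List.slice_to_natCast,
            e1, ej1, PySem.List.slice_from_natCast, PySem.List.slice_from_natCast,
            List.take_length_add_append, List.drop_length_add_append]
        have := ih front (rest.take j ++ rest.drop (j + 1)) j
        rw [← List.append_assoc] at this
        exact this
      · rw [if_neg hs, if_neg hs]
        by_cases hb4 : (j : Int) + 4 > (rest.length : Int)
        · rw [if_pos (by simp; omega), if_pos hb4]
        · rw [if_neg (by simp; omega), if_neg hb4]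
          rw [e4, ej4, pvSliceShift]
          by_cases ha : pvIsAABB (PySem.List.slice rest (some ((j:Nat) : Int)) (some ((j + 4 : Nat) : Int))) = true
          · rw [if_pos ha, if_pos ha]
            rw [PySem.List.slice_zero_start, PySem.List.slice_zero_start,
                PySem.List.slice_to_natCast, PySem.List.slice_to_natCast,
                PySem.List.slice_from_natCast, PySem.List.slice_from_natCast,
                List.take_length_add_append, List.drop_length_add_append]
            have := ih front (rest.take (j + 3) ++ rest.drop (j + 4)) j
            rw [← List.append_assoc] at this
            exact this
          · rw [if_neg ha, if_neg ha, e1, ej1]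
            exact ih front rest (j + 1)

lemma pvIsSame_cons (a b c : Char) (l : List Char) :
    pvIsSame (a :: b :: c :: l) = (a == b && b == c) := by
  simp [pvIsSame, PySem.List.pyGet?, PySem.List.pyIdx?]
  split_ifs <;> simp_all <;> omega

lemma pvIsAABB_cons (a b c d : Char) (l : List Char) :
    pvIsAABB (a :: b :: c :: d :: l) = (a == b && c == d) := by
  simp [pvIsAABB, PySem.List.pyGet?, PySem.List.pyIdx?]
  split_ifs <;> simp_all <;> omega

-- the triple rule at the head of a run is invisible to B's run scan
lemma pvBRun_triple (a : Char) (t : List Char) :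
    pvBRun (a :: a :: a :: t) = pvBRun (a :: a :: t) := by
  simp [pvBRun, pvBNext, List.dropWhile_cons]

-- the AABB rule behind a double is invisible to B's run scan
lemma pvBRun_aabb (a c : Char) (t : List Char) (hne : c ≠ a) :
    pvBRun (a :: a :: c :: c :: t) = pvBRun (a :: a :: c :: t) := by
  have hca : (c == a) = false := by simp [hne]
  simp [pvBRun, pvBNext, List.dropWhile_cons, hca]

-- when neither rule fires at the head, B commits exactly one character
lemma pvBRun_advance (a b c d : Char) (t : List Char)
    (h3 : ¬(a = b ∧ b = c)) (h4 : ¬(a = b ∧ c = d)) :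
    pvBRun (a :: b :: c :: d :: t) = a :: pvBRun (b :: c :: d :: t) := by
  by_cases hab : b = a
  · subst hab
    have hcb : c ≠ b := fun h => h3 ⟨rfl, h.symm⟩
    have hdc : d ≠ c := fun h => h4 ⟨rfl, h.symm⟩
    have hcb' : (c == b) = false := by simp [hcb]
    have hdc' : (d == c) = false := by simp [hdc]
    simp [pvBRun, pvBNext, List.dropWhile_cons, hcb, hdc, hcb', hdc']
  · simp [pvBRun, hab]

lemma pvBRun_three (a b c : Char) (h : ¬(a = b ∧ b = c)) :
    pvBRun [a, b, c] = [a, b, c] := by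
  by_cases hab : b = a
  · subst hab
    have hcb : c ≠ b := fun hh => h ⟨rfl, hh.symm⟩
    have hcb' : (c == b) = false := by simp [hcb]
    simp [pvBRun, pvBNext, List.dropWhile_cons, hcb, hcb']
  · by_cases hcb : c = b
    · subst hcb
      simp [pvBRun, pvBNext, List.dropWhile_cons, hab]
    · simp [pvBRun, hab, hcb]

lemma pvBRun_two (a b : Char) : pvBRun [a, b] = [a, b] := by
  by_cases hab : b = a
  · subst hab
    simp [pvBRun, pvBNext, List.dropWhile_cons]
  · simp [pvBRun, hab]

-- main simulation: with enough fuel, A's loop from i = 0 computes B's run scan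
lemma pvSim : ∀ (m : Nat) (rest : List Char) (fuel : Nat),
    rest.length ≤ m → 2 * rest.length + 1 ≤ fuel →
    pvALoop rest 0 fuel = pvBRun rest := by
  intro m
  induction m with
  | zero =>
    intro rest fuel hm hf
    have : rest = [] := List.eq_nil_of_length_eq_zero (by omega)
    subst this
    obtain ⟨f, rfl⟩ : ∃ f, fuel = f + 1 := ⟨fuel - 1, by omega⟩
    simp [pvALoop, pvBRun]
  | succ m ih =>
    intro rest fuel hm hf
    obtain ⟨f, rfl⟩ : ∃ f, fuel = f + 1 := ⟨fuel - 1, by omega⟩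
    match rest with
    | [] => simp [pvALoop, pvBRun]
    | [a] =>
      simp only [pvALoop]
      rw [if_pos (by simp only [List.length_cons, List.length_nil]; omega)]
      simp [pvBRun, pvBNext]
    | [a, b] =>
      simp only [pvALoop]
      rw [if_pos (by simp only [List.length_cons, List.length_nil]; omega)]
      rw [pvBRun_two]
    | a :: b :: c :: t =>
      have hlen : (a :: b :: c :: t).length = t.length + 3 := by simp
      simp only [pvALoop, zero_add]
      rw [if_neg (by simp; omega)]
      have hsl3 : PySem.List.slice (a :: b :: c :: t) (some 0) (some 3) = [a, b, c] := by
        rw [PySem.List.slice_zero_start, PySem.List.slice_to _ (by norm_num)]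
        rw [show Int.toNat 3 = 3 from rfl]
        simp [List.take]
      rw [hsl3, pvIsSame_cons]
      by_cases h3 : a = b ∧ b = c
      · rw [if_pos (by simp [h3.1, h3.2])]
        clear hsl3
        obtain ⟨rfl, rfl⟩ := h3
        have hnl : PySem.List.slice (a :: a :: a :: t) (some 0) (some 0) ++
            PySem.List.slice (a :: a :: a :: t) (some 1) none = a :: a :: t := by
          rw [PySem.List.slice_zero_start, PySem.List.slice_to _ (by norm_num),
              PySem.List.slice_from _ (by norm_num)]
          rw [show Int.toNat 0 = 0 from rfl, show Int.toNat 1 = 1 from rfl]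
          simp
        rw [hnl, ih _ f (by simp only [List.length_cons] at hm ⊢; omega) (by simp only [List.length_cons] at hf ⊢; omega), pvBRun_triple]
      · rw [if_neg (by simp; tauto)]
        match t with
        | [] =>
          rw [if_pos (by simp)]
          rw [pvBRun_three a b c h3]
        | d :: t2 =>
          rw [if_neg (by simp; omega)]
          have hsl4 : PySem.List.slice (a :: b :: c :: d :: t2) (some 0) (some 4) = [a, b, c, d] := by
            rw [PySem.List.slice_zero_start, PySem.List.slice_to _ (by norm_num)]
            rw [show Int.toNat 4 = 4 from rfl]
            simp [List.take]
          rw [hsl4, pvIsAABB_cons]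
          by_cases h4 : a = b ∧ c = d
          · rw [if_pos (by simp [h4.1, h4.2])]
            obtain ⟨rfl, rfl⟩ := h4
            have hca : c ≠ a := fun hh => h3 ⟨rfl, hh.symm⟩
            have hnl : [a, a, c] ++ PySem.List.slice (a :: a :: c :: c :: t2) (some 4) none
                = a :: a :: c :: t2 := by
              rw [PySem.List.slice_from _ (by norm_num)]
              rw [show Int.toNat 4 = 4 from rfl]
              simp
            rw [hnl, ih _ f (by simp only [List.length_cons] at hm ⊢; omega) (by simp only [List.length_cons] at hf ⊢; omega)]
            exact (pvBRun_aabb a c t2 hca).symm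
          · rw [if_neg (by simp; tauto)]
            have hshift := pvALoop_shift f [a] (b :: c :: d :: t2) 0
            have e1 : (([a].length + 0 : Nat) : Int) = 1 := by norm_num
            rw [e1] at hshift
            simp only [List.singleton_append, Nat.cast_zero] at hshift
            rw [hshift, ih _ f (by simp only [List.length_cons] at hm ⊢; omega) (by simp only [List.length_cons] at hf ⊢; omega)]
            exact (pvBRun_advance a b c d t2 h3 h4).symm

-- ===== VERDICT (by name: the statement is the Claim_ definition above) =====
theorem StringReduce_spec : Claim_equal_StringReduce := by
  unfold Claim_equal_StringReduce
  intro s lb _hdom hpre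
  unfold Spec_StringReduce StringReduce StringReduce_alt
  by_cases hsm : lb + 3 > (s.toList.length : Int)
  · rw [if_pos hsm]
    obtain ⟨f, hf⟩ : ∃ f, 2 * s.toList.length + 4 = f + 1 := ⟨2 * s.toList.length + 3, by omega⟩
    rw [hf]
    simp only [pvALoop]
    rw [if_pos hsm]
    simp
  · rw [if_neg hsm]
    have h0 : 0 ≤ lb := by
      rcases hpre with h | ⟨h1, _⟩
      · exact h
      · omega
    have hsl1 : PySem.List.slice s.toList none (some lb) = s.toList.take lb.toNat :=
      PySem.List.slice_to _ h0
    have hsl2 : PySem.List.slice s.toList (some lb) none = s.toList.drop lb.toNat :=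
      PySem.List.slice_from _ h0
    rw [hsl1, hsl2]
    have hjn : lb.toNat ≤ s.toList.length := by omega
    have hlen : (s.toList.take lb.toNat).length = lb.toNat := by
      rw [List.length_take]; omega
    have key := pvALoop_shift (2 * s.toList.length + 4) (s.toList.take lb.toNat)
      (s.toList.drop lb.toNat) 0
    rw [List.take_append_drop] at key
    have e : (((s.toList.take lb.toNat).length + 0 : Nat) : Int) = lb := by rw [hlen]; omega
    rw [e] at key
    simp only [Nat.cast_zero] at key
    rw [key, pvSim (s.toList.drop lb.toNat).length _ _ le_rfl
      (by rw [List.length_drop]; omega)]
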